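-- pv_equiv track=rewrite | github.com/Jonnyton/Workflow | workflow/api/engine_helpers.py | _split_whitelist_entry
-- ===== SOURCE A (Python) =====
-- def _split_whitelist_entry(raw: str) -> list[str]:
--     """Split the env var on ``;`` (always) and on ``:`` except when the
--     colon is a Windows drive-letter separator (e.g. ``C:\\Users``).
--     """
--     chunks: list[str] = []
--     for semi_chunk in raw.split(";"):
--         # A bare ``:`` separator joins two paths; a drive-letter colon
--         # has a single letter to its left. Walk the string and split
--         # only on the first kind.
--         buffer = []
--         i = 0
--         while i < len(semi_chunk):
--             ch = semi_chunk[i]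
--             if ch == ":":
--                 # Drive letter iff this is position 1 of the current
--                 # buffer AND the char before is a single letter AND
--                 # the char after is a path separator.
--                 if (
--                     len(buffer) == 1
--                     and buffer[0].isalpha()
--                     and i + 1 < len(semi_chunk)
--                     and semi_chunk[i + 1] in ("/", "\\")
--                 ):
--                     buffer.append(ch)
--                     i += 1
--                     continue
--                 # Otherwise this colon separates paths.
--                 chunks.append("".join(buffer))
--                 buffer = []
--                 i += 1
--                 continue
--             buffer.append(ch)
--             i += 1
--         if buffer:
--             chunks.append("".join(buffer))
--     return chunks
-- ===== SOURCE B (Python) =====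
-- def _split_whitelist_entry(raw: str) -> list[str]:
--     """Split on ';' and on path-separating ':' (keeping drive-letter colons):
--     per semicolon segment, split on ':' once and re-merge drive-letter pieces."""
--     chunks: list[str] = []
--     for seg in raw.split(";"):
--         pieces = seg.split(":")
--         tokens: list[str] = []
--         j = 0
--         while j < len(pieces):
--             p = pieces[j]
--             if (
--                 len(p) == 1
--                 and p.isalpha()
--                 and j + 1 < len(pieces)
--                 and pieces[j + 1][:1] in ("/", "\\")
--             ):
--                 tokens.append(p + ":" + pieces[j + 1])
--                 j += 2
--             else:
--                 tokens.append(p)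
--                 j += 1
--         if tokens and tokens[-1] == "":
--             tokens.pop()
--         chunks.extend(tokens)
--     return chunks
-- ===== Notes on version B (the rewrite author's own statement) =====
-- stated objective: faster
-- what changed: A walks each semicolon-segment character by character with a growing buffer; B splits each segment on the colon up front (C-level str.split), re-merges a single-letter piece with a following piece that starts with a path separator, and drops one trailing empty token.
import Mathlib
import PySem

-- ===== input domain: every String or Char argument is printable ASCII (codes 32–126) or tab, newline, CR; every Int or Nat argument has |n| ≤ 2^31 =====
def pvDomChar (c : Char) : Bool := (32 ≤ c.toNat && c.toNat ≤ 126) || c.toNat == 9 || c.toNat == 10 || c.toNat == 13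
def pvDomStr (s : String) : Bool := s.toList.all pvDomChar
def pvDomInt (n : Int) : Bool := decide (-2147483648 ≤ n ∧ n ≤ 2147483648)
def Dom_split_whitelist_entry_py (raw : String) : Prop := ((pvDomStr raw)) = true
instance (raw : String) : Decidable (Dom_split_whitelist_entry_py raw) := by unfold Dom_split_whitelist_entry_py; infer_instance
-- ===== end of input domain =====

-- B replaces A's per-character walk by split-on-colon then re-merge of drive-letter pieces (measured constant-factor faster in Python via str.split).

-- ===== PORT A =====
-- drive-letter test: current buffer is a single letter and the char after the colon is a path separator
def pvDriveA (buf rest : List Char) : Bool :=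
  match buf, rest with
  | [b], r :: _ => PySem.Chars.isalpha b && (r == '/' || r == '\\')
  | _, _ => false

-- the inner `while i < len(semi_chunk)` loop of A, recursing on the remaining characters
def pvWalkA : List Char → List Char → List (List Char) → List (List Char)
  | [], buf, chunks => if buf.isEmpty then chunks else chunks ++ [buf]
  | c :: rest, buf, chunks =>
    if c = ':' then
      if pvDriveA buf rest then pvWalkA rest (buf ++ [c]) chunks
      else pvWalkA rest [] (chunks ++ [buf])
    else pvWalkA rest (buf ++ [c]) chunks

def split_whitelist_entry_py (raw : String) : List String :=
  ((raw.toList.splitOn ';').foldl (fun chunks semi => pvWalkA semi [] chunks) []).map String.ofList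

-- ===== PORT B =====
-- piece j is a drive letter iff it is a single letter and the next piece starts with a path separator
def pvDriveB (p q : List Char) : Bool :=
  match p, q with
  | [b], r :: _ => PySem.Chars.isalpha b && (r == '/' || r == '\\')
  | _, _ => false

-- B's `while j < len(pieces)` merge loop
def pvMergeB : List (List Char) → List (List Char)
  | [] => []
  | [p] => [p]
  | p :: q :: rest =>
    if pvDriveB p q then (p ++ ':' :: q) :: pvMergeB rest
    else p :: pvMergeB (q :: rest)

-- `if tokens and tokens[-1] == '': tokens.pop()`
def pvDropTrailB (ts : List (List Char)) : List (List Char) :=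
  match ts.getLast? with
  | some [] => ts.dropLast
  | _ => ts

def split_whitelist_entry_py_alt (raw : String) : List String :=
  ((raw.toList.splitOn ';').foldl
      (fun chunks seg => chunks ++ pvDropTrailB (pvMergeB (seg.splitOn ':'))) []).map String.ofList

-- ===== PRECONDITION & SPEC =====
def Spec_split_whitelist_entry_py (raw : String) (out : List String) : Prop := out = split_whitelist_entry_py_alt raw
instance (raw : String) (out : List String) : Decidable (Spec_split_whitelist_entry_py raw out) := by unfold Spec_split_whitelist_entry_py; infer_instance

-- ===== CLAIM (what is proved, stated in full; the proofs are below) =====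
def Claim_equal_split_whitelist_entry_py : Prop := ∀ (raw : String), Dom_split_whitelist_entry_py raw → Spec_split_whitelist_entry_py raw (split_whitelist_entry_py raw)

-- ===== LEMMAS AND PROOFS =====

-- proof-only reference loop: A's walk, reorganised along the colon-pieces of the remaining input,
-- carrying the pending buffer `buf` into the first piece
def pvH : List Char → List (List Char) → List (List Char)
  | _,   [] => []
  | buf, [p] => [buf ++ p]
  | buf, p :: q :: rest =>
    if pvDriveA (buf ++ p) q then pvH (buf ++ p ++ [':']) (q :: rest)
    else (buf ++ p) :: pvH [] (q :: rest)

theorem pvH_ne_nil (buf : List Char) (p : List Char) (t : List (List Char)) :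
    pvH buf (p :: t) ≠ [] := by
  induction t generalizing buf p with
  | nil => simp [pvH]
  | cons q t ih =>
    simp only [pvH]
    split
    · exact ih _ _
    · simp

theorem pvDriveA_of_len_ne_one (x r : List Char) (h : x.length ≠ 1) : pvDriveA x r = false := by
  match x, r with
  | [], _ => rfl
  | [a], _ => simp at h
  | a :: b :: _, [] => rfl
  | a :: b :: _, _ :: _ => rfl

-- a buffer of length ≥ 2 can never be a drive letter again: pvH just flushes piece by piece
theorem pvH_long (buf q : List Char) (rest : List (List Char)) (h : buf.length ≠ 1) (h0 : buf ≠ []) :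
    pvH buf (q :: rest) = (buf ++ q) :: (if rest = [] then [] else pvH [] rest) := by
  cases rest with
  | nil => simp [pvH]
  | cons r t =>
    have : pvDriveA (buf ++ q) r = false := by
      apply pvDriveA_of_len_ne_one
      rcases buf with _ | ⟨a, _ | ⟨b, bs⟩⟩ <;> simp_all
    simp [pvH, this]

theorem pvDropTrailB_cons (b : List Char) (x : List (List Char)) (hx : x ≠ []) :
    pvDropTrailB (b :: x) = b :: pvDropTrailB x := by
  rcases x with _ | ⟨y, t⟩
  · simp at hx
  · simp only [pvDropTrailB, List.getLast?_cons_cons]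
    split <;> simp [List.dropLast]

theorem pvDriveA_headI (buf rest : List Char) :
    pvDriveA buf ((rest.splitOn ':').headI) = pvDriveA buf rest := by
  cases rest with
  | nil => cases buf <;> simp [List.splitOn, List.splitOnP_nil, pvDriveA]
  | cons r rs =>
    by_cases hr : r = ':'
    · subst hr
      simp only [List.splitOn, List.splitOnP_cons, beq_self_eq_true, List.headI]
      rcases buf with _ | ⟨a, _ | _⟩ <;> simp [pvDriveA]
    · have : (r == ':') = false := by simp [hr]
      simp only [List.splitOn, List.splitOnP_cons, this, Bool.false_eq_true, if_false]
      obtain ⟨p, t, hs⟩ := List.exists_cons_of_ne_nil (List.splitOnP_ne_nil _ rs)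
      rw [hs]
      simp only [List.modifyHead, List.headI]
      rcases buf with _ | ⟨a, _ | _⟩ <;> rfl

theorem pvH_shift (buf p : List Char) (cc : Char) (t : List (List Char)) :
    pvH buf ((cc :: p) :: t) = pvH (buf ++ [cc]) (p :: t) := by
  cases t with
  | nil => simp [pvH]
  | cons q t' =>
    have h1 : buf ++ (cc :: p) = (buf ++ [cc]) ++ p := by simp
    simp only [pvH, h1]

-- the main invariant: A's walk over the characters of a segment equals
-- drop-one-trailing-empty of pvH over the colon-pieces of that segment
theorem pvWalkA_eq (cs : List Char) :
    ∀ buf chunks, pvWalkA cs buf chunks = chunks ++ pvDropTrailB (pvH buf (cs.splitOn ':')) := by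
  induction cs with
  | nil =>
    intro buf chunks
    simp only [List.splitOn, List.splitOnP_nil, pvH, pvWalkA]
    cases buf <;> simp [pvDropTrailB]
  | cons c rest ih =>
    intro buf chunks
    obtain ⟨p, t, hs⟩ := List.exists_cons_of_ne_nil (List.splitOnP_ne_nil (fun x => x == ':') rest)
    by_cases hc : c = ':'
    · subst hc
      have hsplit : (':' :: rest).splitOn ':' = [] :: rest.splitOn ':' := by
        simp [List.splitOn, List.splitOnP_cons]
      rw [hsplit]
      have hdr : pvDriveA (buf ++ []) p = pvDriveA buf rest := by
        have := pvDriveA_headI buf rest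
        rw [show (rest.splitOn ':') = p :: t from hs] at this
        simpa using this
      show pvWalkA (':' :: rest) buf chunks = _
      rw [show (rest.splitOn ':' : List (List Char)) = p :: t from hs]
      simp only [pvH, hdr, pvWalkA]
      by_cases hd : pvDriveA buf rest = true
      · rw [if_pos hd, if_pos hd, ih]
        rw [show (rest.splitOn ':' : List (List Char)) = p :: t from hs]
        simp
      · rw [if_neg hd, if_neg hd, ih]
        rw [show (rest.splitOn ':' : List (List Char)) = p :: t from hs]
        rw [pvDropTrailB_cons _ _ (pvH_ne_nil _ _ _)]
        simp
    · have hsplit : ((c :: rest).splitOn ':') = (c :: p) :: t := by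
        have : (c == ':') = false := by simp [hc]
        simp only [List.splitOn, List.splitOnP_cons, this, Bool.false_eq_true, if_false]
        rw [show (rest.splitOnP (fun x => x == ':')) = p :: t from hs]
        rfl
      rw [hsplit]
      simp only [pvWalkA, if_neg hc]
      rw [ih, pvH_shift]
      rw [show (rest.splitOn ':' : List (List Char)) = p :: t from hs]

-- pvH with empty pending buffer is exactly B's merge loop
theorem pvH_eq_mergeB : ∀ (l : List (List Char)), l ≠ [] → pvH [] l = pvMergeB l := by
  intro l
  induction l using pvMergeB.induct with
  | case1 => intro h; simp at h
  | case2 p => intro _; simp [pvH, pvMergeB]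
  | case3 p q rest hd ih =>
    intro _
    have hd' : pvDriveA ([] ++ p) q = true := by simpa [pvDriveA, pvDriveB] using hd
    have hp : p.length = 1 := by
      rcases p with _ | ⟨a, _ | _⟩ <;> first | rfl | (simp [pvDriveB] at hd)
    rw [show pvH [] (p :: q :: rest) = pvH ([] ++ p ++ [':']) (q :: rest) from by
          simp only [pvH]; rw [if_pos hd']]
    rw [pvH_long _ _ _ (by simp [hp]) (by rcases p with _ | _ <;> simp)]
    rw [pvMergeB.eq_3, if_pos hd]
    cases rest with
    | nil => simp [pvMergeB]
    | cons r t => rw [if_neg (by simp), ih (by simp)]; simp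
  | case4 p q rest hd ih =>
    intro _
    have hd' : pvDriveA ([] ++ p) q = false := by simpa [pvDriveA, pvDriveB] using hd
    simp only [pvH, hd', pvMergeB, hd, Bool.false_eq_true, if_false]
    rw [ih (by simp)]
    simp

theorem pvWalkA_eq_B (cs : List Char) (chunks : List (List Char)) :
    pvWalkA cs [] chunks = chunks ++ pvDropTrailB (pvMergeB (cs.splitOn ':')) := by
  rw [pvWalkA_eq, pvH_eq_mergeB _ (by simpa [List.splitOn] using List.splitOnP_ne_nil (fun x => x == ':') cs)]

-- ===== VERDICT (by name: the statement is the Claim_ definition above) =====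
theorem split_whitelist_entry_py_spec : Claim_equal_split_whitelist_entry_py := by
  intro raw _
  show split_whitelist_entry_py raw = split_whitelist_entry_py_alt raw
  unfold split_whitelist_entry_py split_whitelist_entry_py_alt
  congr 1
  apply PySem.List.foldl_congr_mem
  intro chunks seg _
  exact pvWalkA_eq_B seg chunks
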